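-- pv_equiv track=rewrite | github.com/Uber-Career-Prep-2023/Uber-Career-Prep-Homework-Liang-Xiao | Assignment-4/Catalan_Numbers.py | catalanNumbers
-- ===== SOURCE A (Python) =====
-- def catalanNumbers(n):
--     res = [1]
--     if n == 0:
--         return res
--     for i in range(1, n + 1):
--         cur = res[-1] * (2 * i - 1) * 2 // (i + 1)
--         res.append(cur)
--     return res
-- ===== SOURCE B (Python) =====
-- from math import comb
--
-- def catalanNumbers(n):
--     # Closed form for the top value, then descend with the inverse recurrence
--     # C_{i-1} = C_i * (i+1) // (4*i-2), emitting the list back-to-front and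
--     # reversing it at the end.
--     m = max(n, 0)
--     c = comb(2 * m, m) // (m + 1)
--     out = []
--     for i in range(m, 0, -1):
--         out.append(c)
--         c = c * (i + 1) // (4 * i - 2)
--     out.append(1)
--     out.reverse()
--     return out
-- ===== Notes on version B (the rewrite author's own statement) =====
-- stated objective: alternative
-- what changed: Instead of growing the list forward from C_0 with the multiplicative recurrence, B computes the top value C_n once by the closed form comb(2n,n)//(n+1) and then descends with the inverse recurrence C_{i-1} = C_i*(i+1)//(4i-2), emitting the list back-to-front and reversing it.
import Mathlib
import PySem

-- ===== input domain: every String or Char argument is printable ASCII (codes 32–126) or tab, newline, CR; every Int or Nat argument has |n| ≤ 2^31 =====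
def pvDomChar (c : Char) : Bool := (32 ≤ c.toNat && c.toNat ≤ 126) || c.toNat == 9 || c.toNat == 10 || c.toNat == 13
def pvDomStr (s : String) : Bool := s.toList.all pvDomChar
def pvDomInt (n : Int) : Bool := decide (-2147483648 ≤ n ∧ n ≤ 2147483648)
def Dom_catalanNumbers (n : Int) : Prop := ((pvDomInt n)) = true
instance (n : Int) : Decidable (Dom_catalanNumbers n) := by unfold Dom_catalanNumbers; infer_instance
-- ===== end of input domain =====

-- B computes the top value C_n by the closed form comb(2n,n)//(n+1) and descends with the
-- inverse recurrence C_{i-1} = C_i*(i+1)//(4i-2), emitting the list back-to-front and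
-- reversing it, instead of A's forward multiplicative recurrence; objective: alternative algorithm.

-- ===== PORT A =====
def catalanNumbers (n : Int) : List Int :=
  let res : List Int := [1]
  if n == 0 then res
  else
    (PySem.List.pyRange 1 (n + 1)).foldl
      (fun res i =>
        -- res[-1]: res is never empty here, so the `getD 0` default is unreachable (exact)
        let cur := PySem.Int.floordiv ((PySem.List.pyGet? res (-1)).getD 0 * (2 * i - 1) * 2) (i + 1)
        res ++ [cur]) res

-- ===== PORT B =====
def catalanNumbers_alt (n : Int) : List Int :=
  let m := max n 0
  -- math.comb(2*m, m): m is a nonnegative Int here, so Nat.choose on toNat is exact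
  let c : Int := PySem.Int.floordiv (((2 * m).toNat.choose m.toNat : Int)) (m + 1)
  let s := (PySem.List.pyRange m 0 (-1)).foldl
    (fun (s : List Int × Int) i =>
      (s.1 ++ [s.2], PySem.Int.floordiv (s.2 * (i + 1)) (4 * i - 2)))
    ([], c)
  (s.1 ++ [1]).reverse

-- ===== PRECONDITION & SPEC =====
def Spec_catalanNumbers (n : Int) (out : List Int) : Prop := out = catalanNumbers_alt n
instance (n : Int) (out : List Int) : Decidable (Spec_catalanNumbers n out) := by unfold Spec_catalanNumbers; infer_instance

-- ===== CLAIM (what is proved, stated in full; the proofs are below) =====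
def Claim_equal_catalanNumbers : Prop := ∀ (n : Int), Dom_catalanNumbers n → Spec_catalanNumbers n (catalanNumbers n)

-- ===== LEMMAS AND PROOFS =====

theorem pvGetLast_append (xs : List Int) (x : Int) :
    PySem.List.pyGet? (xs ++ [x]) (-1) = some x := by
  simp [PySem.List.pyGet?, PySem.List.pyIdx?]

-- Nat form of A's step: the recurrence step lands exactly on the next Catalan number
theorem pvCatalan_step (m : Nat) :
    catalan m * (2 * m + 1) * 2 = (m + 2) * catalan (m + 1) := by
  have h1 := Nat.succ_mul_centralBinom_succ m
  have h2 := succ_mul_catalan_eq_centralBinom m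
  have h3 := succ_mul_catalan_eq_centralBinom (m + 1)
  have : (m + 1) * (catalan m * (2 * m + 1) * 2) = (m + 1) * ((m + 2) * catalan (m + 1)) := by
    calc (m + 1) * (catalan m * (2 * m + 1) * 2)
        = 2 * (2 * m + 1) * ((m + 1) * catalan m) := by ring
      _ = 2 * (2 * m + 1) * m.centralBinom := by rw [h2]
      _ = (m + 1) * (m + 1).centralBinom := h1.symm
      _ = (m + 1) * ((m + 1 + 1) * catalan (m + 1)) := by rw [h3]
      _ = (m + 1) * ((m + 2) * catalan (m + 1)) := by ring
  exact Nat.eq_of_mul_eq_mul_left (Nat.succ_pos m) this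

theorem pvA_step (m : Nat) :
    PySem.Int.floordiv ((catalan m : Int) * (2 * ((m : Int) + 1) - 1) * 2) (((m : Int) + 1) + 1)
      = (catalan (m + 1) : Int) := by
  have hnum : (catalan m : Int) * (2 * ((m : Int) + 1) - 1) * 2
      = ((catalan m * (2 * m + 1) * 2 : Nat) : Int) := by push_cast; ring
  have hden : ((m : Int) + 1) + 1 = ((m + 2 : Nat) : Int) := by push_cast; ring
  rw [hnum, hden, PySem.Int.floordiv_natCast, pvCatalan_step m,
    Nat.mul_div_cancel_left _ (by omega : 0 < m + 2)]

-- A's loop produces the list of Catalan numbers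
theorem pvA_loop (m : Nat) :
    (PySem.List.pyRange 1 ((m : Int) + 1)).foldl
      (fun res i =>
        let cur := PySem.Int.floordiv ((PySem.List.pyGet? res (-1)).getD 0 * (2 * i - 1) * 2) (i + 1)
        res ++ [cur]) [1]
      = (List.range (m + 1)).map (fun i => (catalan i : Int)) := by
  induction m with
  | zero => simp [PySem.List.pyRange_one_eq_nil (le_refl (1:Int)), List.range_succ]
  | succ m ih =>
      have hcast : ((m + 1 : Nat) : Int) + 1 = ((m : Int) + 1) + 1 := by push_cast; ring
      rw [hcast, PySem.List.pyRange_one_succ_right (by omega : (1:Int) ≤ (m : Int) + 1),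
        List.foldl_append, ih]
      simp only [List.foldl]
      rw [show (List.range (m + 1)).map (fun i => (catalan i : Int))
            = (List.range m).map (fun i => (catalan i : Int)) ++ [(catalan m : Int)] by
          simp [List.range_succ],
        pvGetLast_append]
      simp only [Option.getD_some]
      rw [pvA_step m]
      simp [List.range_succ]

-- the inverse recurrence step is exact: dividing C_{m+1}*(m+2) by 4(m+1)-2 recovers C_m
theorem pvDown_step (m : Nat) :
    PySem.Int.floordiv ((catalan (m + 1) : Int) * (((m : Int) + 1) + 1)) (4 * ((m : Int) + 1) - 2)
      = (catalan m : Int) := by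
  have hnum : (catalan (m + 1) : Int) * (((m : Int) + 1) + 1)
      = ((catalan m * (2 * m + 1) * 2 : Nat) : Int) := by
    rw [pvCatalan_step m]; push_cast; ring
  have hden : 4 * ((m : Int) + 1) - 2 = ((2 * (2 * m + 1) : Nat) : Int) := by push_cast; ring
  have hfac : catalan m * (2 * m + 1) * 2 = 2 * (2 * m + 1) * catalan m := by ring
  rw [hnum, hden, PySem.Int.floordiv_natCast, hfac,
    Nat.mul_div_cancel_left _ (by omega : 0 < 2 * (2 * m + 1))]

-- the closed form comb(2m, m) // (m+1) is the m-th Catalan number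
theorem pvTop (m : Nat) :
    PySem.Int.floordiv (((2 * m).choose m : Int)) ((m : Int) + 1) = (catalan m : Int) := by
  have hden : (m : Int) + 1 = ((m + 1 : Nat) : Int) := by push_cast; ring
  rw [hden, PySem.Int.floordiv_natCast,
    show (2 * m).choose m = m.centralBinom from rfl, ← catalan_eq_centralBinom_div m]

-- the descending loop emits C_m, C_{m-1}, …, C_1 and ends with the accumulator at C_0 = 1
theorem pvDown_loop (m : Nat) : ∀ out0 : List Int,
    (PySem.List.pyRange (m : Int) 0 (-1)).foldl
      (fun (s : List Int × Int) i =>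
        (s.1 ++ [s.2], PySem.Int.floordiv (s.2 * (i + 1)) (4 * i - 2)))
      (out0, (catalan m : Int))
      = (out0 ++ (List.range m).map (fun k => (catalan (m - k) : Int)), (1 : Int)) := by
  induction m with
  | zero =>
      intro out0
      simp only [Nat.cast_zero]
      rw [PySem.List.pyRange_neg_one_eq_nil (le_refl (0 : Int))]
      simp
  | succ m ih =>
      intro out0
      have hcons : PySem.List.pyRange ((m + 1 : Nat) : Int) 0 (-1)
          = ((m + 1 : Nat) : Int) :: PySem.List.pyRange (((m + 1 : Nat) : Int) - 1) 0 (-1) :=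
        PySem.List.pyRange_neg_one_cons (by push_cast; omega)
      have hc1 : ((m + 1 : Nat) : Int) - 1 = (m : Int) := by push_cast; ring
      have hc2 : ((m + 1 : Nat) : Int) = (m : Int) + 1 := by push_cast; ring
      rw [hcons, hc1]
      simp only [List.foldl_cons, hc2, pvDown_step m]
      rw [ih (out0 ++ [(catalan (m + 1) : Int)])]
      rw [List.append_assoc]
      congr 1
      rw [List.range_succ_eq_map, List.map_cons, List.map_map]
      simp [Nat.succ_sub_succ]

-- reversing the emitted list (with the trailing seed 1) yields C_0 … C_m in order
theorem pvRev (m : Nat) :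
    (((List.range m).map (fun k => (catalan (m - k) : Int))) ++ [(1 : Int)]).reverse
      = (List.range (m + 1)).map (fun k => (catalan k : Int)) := by
  rw [List.reverse_append, List.reverse_singleton, List.singleton_append,
    List.range_succ_eq_map, List.map_cons, List.map_map]
  show (1 : Int) :: _ = (catalan 0 : Int) :: _
  congr 1
  · simp
  apply List.ext_getElem
  · simp
  · intro i h1 h2
    simp only [List.getElem_reverse, List.length_map, List.length_range, List.getElem_map,
      List.getElem_range, Function.comp]
    have hi : i < m := by simpa using h2
    have h : m - (m - 1 - i) = i.succ := by omega
    rw [h]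

-- B evaluates to the list of Catalan numbers for every Int argument
theorem pvB_eval (n : Int) :
    catalanNumbers_alt n = (List.range (n.toNat + 1)).map (fun k => (catalan k : Int)) := by
  unfold catalanNumbers_alt
  have hmax : max n 0 = ((n.toNat : Nat) : Int) := (Int.toNat_eq_max n).symm
  simp only [hmax]
  have h2 : ((2 : Int) * (n.toNat : Int)).toNat = 2 * n.toNat := by omega
  have h1 : ((n.toNat : Int)).toNat = n.toNat := by omega
  rw [h2, h1, pvTop n.toNat, pvDown_loop n.toNat []]
  simp only [List.nil_append]
  exact pvRev n.toNat

-- ===== VERDICT (by name: the statement is the Claim_ definition above) =====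
theorem catalanNumbers_spec : Claim_equal_catalanNumbers := by
  intro n _
  unfold Spec_catalanNumbers catalanNumbers
  rw [pvB_eval n]
  by_cases hn : 0 < n
  · have hm : n = ((n.toNat : Int)) := (Int.toNat_of_nonneg hn.le).symm
    have hne : (n == 0) = false := by simp; omega
    rw [hne]
    simp only [Bool.false_eq_true, if_false]
    conv_lhs => rw [hm]
    rw [pvA_loop n.toNat]
  · have hnil : PySem.List.pyRange 1 (n + 1) = [] :=
      PySem.List.pyRange_one_eq_nil (by omega)
    have ht : n.toNat = 0 := by omega
    rw [ht]
    by_cases h0 : n = 0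
    · subst h0; simp [List.range_succ]
    · have hne : (n == 0) = false := by simp [h0]
      rw [hne]
      simp only [Bool.false_eq_true, if_false]
      rw [hnil]
      simp [List.range_succ]
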